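-- pv_equiv track=rewrite | github.com/ChrysPatriota/Gerador-de-grade-de-horarios | reparador.py | windowRepairPeriod
-- ===== SOURCE A (Python) =====
-- def windowRepairPeriod(period):
--     class30hr = []
--
--     for schedule, classes in enumerate(period):
--         if classes['disciplina'] is not None:
--             if classes['disciplina']['cargaHoraria'] == 30:
--                 if schedule < 5:
--                     if period[schedule + 5]['disciplina'] is None:
--                         class30hr.append(schedule)
--                 elif 10 <= schedule < 15:
--                     if period[schedule + 5]['disciplina'] is None:
--                         class30hr.append(schedule)
--                 elif 20 <= schedule < 25:
--                     if period[schedule + 5]['disciplina'] is None: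
--                         class30hr.append(schedule)
--
--     if class30hr:
--         for schedule, classes in enumerate(period):
--             if classes['disciplina'] is not None:
--                 if 5 <= schedule < 10:
--                     if period[schedule - 5]['disciplina'] is None:
--                         period[schedule - 5], period[class30hr[0]] = period[class30hr[0]], period[schedule - 5]
--                         del class30hr[0]
--                 elif 15 <= schedule < 20:
--                     if period[schedule - 5]['disciplina'] is None:
--                         period[schedule - 5], period[class30hr[0]] = period[class30hr[0]], period[schedule - 5]
--                         del class30hr[0]
--                 elif 25 <= schedule < 30:
--                     if period[schedule - 5]['disciplina'] is None:
--                         period[schedule - 5], period[class30hr[0]] = period[class30hr[0]], period[schedule - 5]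
--                         del class30hr[0]
--             if not class30hr:
--                 break
--
--     return period
-- ===== SOURCE B (Python) =====
-- def windowRepairPeriod(period):
--     upper = min(len(period), 30)
--     sources = [i for i in range(upper)
--                if i % 10 < 5
--                and period[i]['disciplina'] is not None
--                and period[i]['disciplina']['cargaHoraria'] == 30
--                and period[i + 5]['disciplina'] is None]
--     targets = [j - 5 for j in range(upper)
--                if j % 10 >= 5
--                and period[j]['disciplina'] is not None
--                and period[j - 5]['disciplina'] is None]
--     for s, t in zip(sources, targets):
--         period[t], period[s] = period[s], period[t]
--     return period
-- ===== Notes on version B (the rewrite author's own statement) =====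
-- stated objective: simpler
-- what changed: A's stateful repair loop (three duplicated elif range arms, a queue consumed with del/break while the list is mutated under the running enumerate) is replaced by two independent pure passes with modular index conditions that collect source and target slots from the ORIGINAL list, then one zip of swaps; the equivalence rests on the proved fact that A's live re-checks can only differ from the original list at already-consumed source slots, whose paired branch never fires.
import Mathlib
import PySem

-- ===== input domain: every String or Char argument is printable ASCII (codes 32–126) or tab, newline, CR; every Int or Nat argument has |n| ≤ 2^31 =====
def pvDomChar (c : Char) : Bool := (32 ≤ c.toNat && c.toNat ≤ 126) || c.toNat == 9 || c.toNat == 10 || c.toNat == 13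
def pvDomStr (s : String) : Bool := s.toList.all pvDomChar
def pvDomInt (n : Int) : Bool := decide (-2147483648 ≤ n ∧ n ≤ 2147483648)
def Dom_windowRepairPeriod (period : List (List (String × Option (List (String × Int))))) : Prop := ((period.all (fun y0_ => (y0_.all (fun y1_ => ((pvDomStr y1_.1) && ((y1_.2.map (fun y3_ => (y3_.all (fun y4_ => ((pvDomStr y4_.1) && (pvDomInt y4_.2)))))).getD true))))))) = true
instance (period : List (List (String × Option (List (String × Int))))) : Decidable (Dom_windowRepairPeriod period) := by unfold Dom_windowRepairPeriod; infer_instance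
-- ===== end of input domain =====

-- B replaces A's stateful repair loop (duplicated elif arms, del/break queue, mutation under the
-- running enumerate) by two pure passes over the ORIGINAL list plus one zip of swaps; both Pythons
-- mutate `period` in place and return it — the theorems here are about the returned value.

-- ===== PORT A =====
-- shared one-line dict lookups (KeyError, excluded by Pre_, falls to the getD default)
def pvDisc (c : List (String × Option (List (String × Int)))) : Option (List (String × Int)) :=
  ((PySem.Dict.mk c).get? "disciplina").getD none

def pvCarga (d : List (String × Int)) : Int :=
  ((PySem.Dict.mk d).get? "cargaHoraria").getD 0

-- first pass: `if classes['disciplina'] is not None: if cargaHoraria == 30: <elif band arms>`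
def pvPass1Step (period : List (List (String × Option (List (String × Int)))))
    (acc : List Int) (sc : Int × List (String × Option (List (String × Int)))) : List Int :=
  match pvDisc sc.2 with
  | some d =>
    if pvCarga d = 30 then
      if sc.1 < 5 then
        (if pvDisc (PySem.List.pyGetD period (sc.1 + 5) []) = none then acc ++ [sc.1] else acc)
      else if 10 ≤ sc.1 ∧ sc.1 < 15 then
        (if pvDisc (PySem.List.pyGetD period (sc.1 + 5) []) = none then acc ++ [sc.1] else acc)
      else if 20 ≤ sc.1 ∧ sc.1 < 25 then
        (if pvDisc (PySem.List.pyGetD period (sc.1 + 5) []) = none then acc ++ [sc.1] else acc)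
      else acc
    else acc
  | none => acc

-- the (textually triplicated) body of A's three second-pass elif arms
def pvArm (per : List (List (String × Option (List (String × Int))))) (ch : List Int) (j : Int) :
    List (List (String × Option (List (String × Int)))) × List Int :=
  if pvDisc (PySem.List.pyGetD per (j - 5) []) = none then
    let c0 := ch.headD 0                                  -- class30hr[0]; ch ≠ [] whenever reached
    let a := PySem.List.pyGetD per c0 []                  -- RHS tuple evaluated first
    let b := PySem.List.pyGetD per (j - 5) []
    (((per.set (j - 5).toNat a).set c0.toNat b), ch.tail) -- indices provably ≥ 0 here; .toNat exact
  else (per, ch)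

-- one iteration of A's second loop (enumerate over the LIVE list: fresh read at index j;
-- the Bool component models `if not class30hr: break`, checked at the end of every iteration)
def pvStep2 (st : List (List (String × Option (List (String × Int)))) × List Int × Bool) (j : Int) :
    List (List (String × Option (List (String × Int)))) × List Int × Bool :=
  if st.2.2 then st else
  match pvDisc (PySem.List.pyGetD st.1 j []) with
  | some _ =>
    if 5 ≤ j ∧ j < 10 then
      ((pvArm st.1 st.2.1 j).1, (pvArm st.1 st.2.1 j).2, decide ((pvArm st.1 st.2.1 j).2 = []))
    else if 15 ≤ j ∧ j < 20 then
      ((pvArm st.1 st.2.1 j).1, (pvArm st.1 st.2.1 j).2, decide ((pvArm st.1 st.2.1 j).2 = []))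
    else if 25 ≤ j ∧ j < 30 then
      ((pvArm st.1 st.2.1 j).1, (pvArm st.1 st.2.1 j).2, decide ((pvArm st.1 st.2.1 j).2 = []))
    else (st.1, st.2.1, decide (st.2.1 = []))
  | none => (st.1, st.2.1, decide (st.2.1 = []))

def windowRepairPeriod (period : List (List (String × Option (List (String × Int))))) :
    List (List (String × Option (List (String × Int)))) :=
  let class30hr := (PySem.List.enumerate period).foldl (pvPass1Step period) []
  if class30hr = [] then period
  else ((PySem.List.pyRange 0 (period.length : Int) 1).foldl pvStep2 (period, class30hr, false)).1

-- ===== PORT B =====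
def pvSwap (per : List (List (String × Option (List (String × Int))))) (s t : Int) :
    List (List (String × Option (List (String × Int)))) :=
  (per.set t.toNat (PySem.List.pyGetD per s [])).set s.toNat (PySem.List.pyGetD per t [])

def pvSrcB (period : List (List (String × Option (List (String × Int))))) (i : Int) : Bool :=
  decide (PySem.Int.mod i 10 < 5) &&
  (match pvDisc (PySem.List.pyGetD period i []) with
   | some d => (pvCarga d == 30) && (pvDisc (PySem.List.pyGetD period (i + 5) [])).isNone
   | none => false)

def pvTgtB (period : List (List (String × Option (List (String × Int))))) (j : Int) : Bool :=
  decide (5 ≤ PySem.Int.mod j 10) &&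
  (pvDisc (PySem.List.pyGetD period j [])).isSome &&
  (pvDisc (PySem.List.pyGetD period (j - 5) [])).isNone

def windowRepairPeriod_alt (period : List (List (String × Option (List (String × Int))))) :
    List (List (String × Option (List (String × Int)))) :=
  let upper : Int := min (period.length : Int) 30
  let sources := (PySem.List.pyRange 0 upper 1).filter (pvSrcB period)
  let targets := ((PySem.List.pyRange 0 upper 1).filter (pvTgtB period)).map (fun j => j - 5)
  (sources.zip targets).foldl (fun per st => pvSwap per st.1 st.2) period

-- ===== PRECONDITION & SPEC =====
-- Pre_ excludes exactly the inputs where Python A raises: a slot dict without the key 'disciplina',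
-- a non-None disciplina dict without the key 'cargaHoraria' (KeyError), and a 30-hour class in a
-- first-half band whose neighbour index i+5 is past the end of the list (IndexError).
-- (The ports totalize those reads with getD defaults, so the proved equality happens to hold even
-- outside Pre_; Pre_ only delimits where Python A actually returns.)
def pvPreAt (n : Int) (i : Int) (c : List (String × Option (List (String × Int)))) : Bool :=
  match (PySem.Dict.mk c).get? "disciplina" with
  | none => false
  | some none => true
  | some (some d) =>
    match (PySem.Dict.mk d).get? "cargaHoraria" with
    | none => false
    | some h =>
      !(decide (i < 30) && decide (PySem.Int.mod i 10 < 5) && (h == 30)) || decide (i + 5 < n)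

def Pre_windowRepairPeriod (period : List (List (String × Option (List (String × Int))))) : Prop :=
  ∀ p ∈ PySem.List.enumerate period, pvPreAt (period.length : Int) p.1 p.2 = true

instance (period : List (List (String × Option (List (String × Int))))) :
    Decidable (Pre_windowRepairPeriod period) := by unfold Pre_windowRepairPeriod; infer_instance

def pvWitness_windowRepairPeriod : (List (List (String × Option (List (String × Int))))) :=
  [[("disciplina", some [("cargaHoraria", 30)])], [("disciplina", none)],
   [("disciplina", none)], [("disciplina", none)], [("disciplina", none)],
   [("disciplina", none)], [("disciplina", some [("cargaHoraria", 60)])]]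

def Spec_windowRepairPeriod (period : List (List (String × Option (List (String × Int)))))
    (out : List (List (String × Option (List (String × Int))))) : Prop :=
  out = windowRepairPeriod_alt period

instance (period : List (List (String × Option (List (String × Int)))))
    (out : List (List (String × Option (List (String × Int))))) :
    Decidable (Spec_windowRepairPeriod period out) := by unfold Spec_windowRepairPeriod; infer_instance

-- ===== CLAIM (what is proved, stated in full; the proofs are below) =====
def Claim_equal_windowRepairPeriod : Prop :=
  ∀ (period : List (List (String × Option (List (String × Int))))),
    Dom_windowRepairPeriod period → Pre_windowRepairPeriod period →
    Spec_windowRepairPeriod period (windowRepairPeriod period)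

-- ===== LEMMAS AND PROOFS =====
-- ======== proof-side definitions ========
def pvApply (P : List (List (String × Option (List (String × Int))))) (zs : List (Int × Int)) :
    List (List (String × Option (List (String × Int)))) :=
  zs.foldl (fun per st => pvSwap per st.1 st.2) P

def pvS (P : List (List (String × Option (List (String × Int))))) : List Int :=
  (PySem.List.pyRange 0 (min (P.length : Int) 30) 1).filter (pvSrcB P)

def pvJ (P : List (List (String × Option (List (String × Int))))) : List Int :=
  (PySem.List.pyRange 0 (min (P.length : Int) 30) 1).filter (pvTgtB P)

def pvT (P : List (List (String × Option (List (String × Int))))) : List Int :=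
  (pvJ P).map (fun j => j - 5)

theorem pvAlt_eq (P : List (List (String × Option (List (String × Int))))) :
    windowRepairPeriod_alt P = pvApply P ((pvS P).zip (pvT P)) := rfl

-- ======== basic swap/apply lemmas ========
theorem pvSwap_length (per : List (List (String × Option (List (String × Int))))) (s t : Int) :
    (pvSwap per s t).length = per.length := by simp [pvSwap]

theorem pvApply_length (P : List (List (String × Option (List (String × Int))))) (zs : List (Int × Int)) :
    (pvApply P zs).length = P.length := by
  induction zs generalizing P with
  | nil => rfl
  | cons z zs ih => simpa [pvApply] using (ih (pvSwap P z.1 z.2)).trans (pvSwap_length P z.1 z.2)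

theorem pvApply_append (P : List (List (String × Option (List (String × Int))))) (zs : List (Int × Int)) (z : Int × Int) :
    pvApply P (zs ++ [z]) = pvSwap (pvApply P zs) z.1 z.2 := by
  simp [pvApply, List.foldl_append]

theorem pvGetD_set (l : List (List (String × Option (List (String × Int))))) (a : Nat)
    (v : List (String × Option (List (String × Int)))) (p : Int) (hp : 0 ≤ p) :
    PySem.List.pyGetD (l.set a v) p [] =
      if (a : Int) = p ∧ a < l.length then v else PySem.List.pyGetD l p [] := by
  rw [PySem.List.pyGetD_of_nonneg _ _ hp, PySem.List.pyGetD_of_nonneg _ _ hp]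
  simp only [List.getD_eq_getElem?_getD, List.getElem?_set]
  by_cases hc : (a : Int) = p ∧ a < l.length
  · have h1 : a = p.toNat := by omega
    subst h1
    simp [hc]
  · by_cases h1 : a = p.toNat
    · have h2 : ¬ a < l.length := fun h => hc ⟨by omega, h⟩
      subst h1
      simp [h2]
    · simp [h1, hc]

theorem pvSwap_getD (per : List (List (String × Option (List (String × Int))))) (s t p : Int)
    (hs0 : 0 ≤ s) (hs1 : s < (per.length : Int)) (ht0 : 0 ≤ t) (ht1 : t < (per.length : Int))
    (hp : 0 ≤ p) :
    PySem.List.pyGetD (pvSwap per s t) p [] =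
      if p = s then PySem.List.pyGetD per t []
      else if p = t then PySem.List.pyGetD per s []
      else PySem.List.pyGetD per p [] := by
  unfold pvSwap
  rw [pvGetD_set _ _ _ _ hp, pvGetD_set _ _ _ _ hp]
  simp only [List.length_set]
  split_ifs <;> first
    | rfl
    | omega

-- value of a slot after a sequence of swaps on pairwise-distinct valid positions
theorem pvApply_char (P : List (List (String × Option (List (String × Int))))) :
    ∀ (zs : List (Int × Int)),
      (∀ z ∈ zs, 0 ≤ z.1 ∧ z.1 < (P.length : Int) ∧ 0 ≤ z.2 ∧ z.2 < (P.length : Int)) →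
      (zs.map Prod.fst ++ zs.map Prod.snd).Nodup →
      ∀ p : Int, 0 ≤ p →
      PySem.List.pyGetD (pvApply P zs) p [] =
        (match zs.find? (fun z => z.1 == p || z.2 == p) with
         | some z => if z.2 = p then PySem.List.pyGetD P z.1 [] else PySem.List.pyGetD P z.2 []
         | none => PySem.List.pyGetD P p []) := by
  intro zs
  induction zs using List.reverseRecOn with
  | nil => intro _ _ p hp; simp [pvApply]
  | append_singleton ws z ih =>
    intro hb hnd p hp
    have hbw : ∀ w ∈ ws, 0 ≤ w.1 ∧ w.1 < (P.length : Int) ∧ 0 ≤ w.2 ∧ w.2 < (P.length : Int) :=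
      fun w hw => hb w (List.mem_append_left _ hw)
    have hbz := hb z (List.mem_append_right _ (List.mem_singleton_self z))
    simp only [List.map_append, List.map_cons, List.map_nil, List.nodup_append,
      List.nodup_cons, List.mem_append, List.mem_cons] at hnd
    have hA : (ws.map Prod.fst).Nodup := hnd.1.1
    have hB : (ws.map Prod.snd).Nodup := hnd.2.1.1
    have hz1f : z.1 ∉ ws.map Prod.fst := fun h => hnd.1.2.2 z.1 h z.1 (Or.inl rfl) rfl
    have hz2s : z.2 ∉ ws.map Prod.snd := fun h => hnd.2.1.2.2 z.2 h z.2 (Or.inl rfl) rfl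
    have hz1s : z.1 ∉ ws.map Prod.snd := fun h => hnd.2.2 z.1 (Or.inr (Or.inl rfl)) z.1 (Or.inl h) rfl
    have hz2f : z.2 ∉ ws.map Prod.fst := fun h => hnd.2.2 z.2 (Or.inl h) z.2 (Or.inr (Or.inl rfl)) rfl
    have hz12 : z.1 ≠ z.2 := hnd.2.2 z.1 (Or.inr (Or.inl rfl)) z.2 (Or.inr (Or.inl rfl))
    have hndw : (ws.map Prod.fst ++ ws.map Prod.snd).Nodup := by
      rw [List.nodup_append]
      exact ⟨hA, hB, fun a ha b hb => hnd.2.2 a (Or.inl ha) b (Or.inl hb)⟩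
    have hfnone : ∀ q : Int, q ∉ ws.map Prod.fst → q ∉ ws.map Prod.snd →
        ws.find? (fun w => w.1 == q || w.2 == q) = none := by
      intro q h1 h2
      apply List.find?_eq_none.mpr
      intro w hw
      simp only [Bool.or_eq_true, beq_iff_eq, not_or]
      exact ⟨fun h => h1 (h ▸ List.mem_map_of_mem hw), fun h => h2 (h ▸ List.mem_map_of_mem hw)⟩
    have hlen : ((pvApply P ws).length : Int) = (P.length : Int) := by
      exact_mod_cast congrArg Nat.cast (pvApply_length P ws)
    rw [pvApply_append, pvSwap_getD _ _ _ _ hbz.1 (by rw [hlen]; exact hbz.2.1)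
      hbz.2.2.1 (by rw [hlen]; exact hbz.2.2.2) hp, List.find?_append]
    by_cases hp1 : p = z.1
    · rw [if_pos hp1, ih hbw hndw z.2 hbz.2.2.1, hfnone z.2 hz2f hz2s,
        hfnone p (hp1 ▸ hz1f) (hp1 ▸ hz1s)]
      simp only [Option.none_or, List.find?_singleton]
      have h2p : ¬ (z.2 = p) := fun h => hz12 (hp1 ▸ h.symm)
      simp [hp1]
      exact fun h => absurd h.symm hz12
    · by_cases hp2 : p = z.2
      · rw [if_neg hp1, if_pos hp2, ih hbw hndw z.1 hbz.1, hfnone z.1 hz1f hz1s,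
          hfnone p (hp2 ▸ hz2f) (hp2 ▸ hz2s)]
        simp only [Option.none_or, List.find?_singleton]
        have h2p : z.2 = p := hp2.symm
        simp [h2p]
      · rw [if_neg hp1, if_neg hp2, ih hbw hndw p hp]
        have hz : [z].find? (fun w => w.1 == p || w.2 == p) = none := by
          simp only [List.find?_singleton, Bool.or_eq_true, beq_iff_eq]
          rw [if_neg]
          rintro (h | h)
          · exact hp1 h.symm
          · exact hp2 h.symm
        rw [hz, Option.or_none]

theorem pvApply_getD_not_mem (P : List (List (String × Option (List (String × Int)))))
    (S1 T1 : List Int) (hlen : S1.length = T1.length)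
    (hbS : ∀ x ∈ S1, 0 ≤ x ∧ x < (P.length : Int)) (hbT : ∀ x ∈ T1, 0 ≤ x ∧ x < (P.length : Int))
    (hnd : (S1 ++ T1).Nodup) (p : Int) (hp : 0 ≤ p) (h1 : p ∉ S1) (h2 : p ∉ T1) :
    PySem.List.pyGetD (pvApply P (S1.zip T1)) p [] = PySem.List.pyGetD P p [] := by
  rw [pvApply_char P (S1.zip T1)
    (fun z hz => by
      obtain ⟨ha, hb⟩ := List.of_mem_zip hz
      exact ⟨(hbS _ ha).1, (hbS _ ha).2, (hbT _ hb).1, (hbT _ hb).2⟩)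
    (by rw [List.map_fst_zip hlen.le, List.map_snd_zip hlen.ge]; exact hnd)
    p hp]
  have : (S1.zip T1).find? (fun z => z.1 == p || z.2 == p) = none := by
    apply List.find?_eq_none.mpr
    intro w hw
    obtain ⟨ha, hb⟩ := List.of_mem_zip hw
    simp only [Bool.or_eq_true, beq_iff_eq, not_or]
    exact ⟨fun h => h1 (h ▸ ha), fun h => h2 (h ▸ hb)⟩
  rw [this]

theorem pvApply_getD_mem_snd (P : List (List (String × Option (List (String × Int)))))
    (S1 T1 : List Int) (hlen : S1.length = T1.length)
    (hbS : ∀ x ∈ S1, 0 ≤ x ∧ x < (P.length : Int)) (hbT : ∀ x ∈ T1, 0 ≤ x ∧ x < (P.length : Int))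
    (hnd : (S1 ++ T1).Nodup) (p : Int) (hp : 0 ≤ p) (h2 : p ∈ T1) :
    ∃ s ∈ S1, PySem.List.pyGetD (pvApply P (S1.zip T1)) p [] = PySem.List.pyGetD P s [] := by
  rw [pvApply_char P (S1.zip T1)
    (fun z hz => by
      obtain ⟨ha, hb⟩ := List.of_mem_zip hz
      exact ⟨(hbS _ ha).1, (hbS _ ha).2, (hbT _ hb).1, (hbT _ hb).2⟩)
    (by rw [List.map_fst_zip hlen.le, List.map_snd_zip hlen.ge]; exact hnd)
    p hp]
  have hdisj : ∀ a ∈ S1, a ∉ T1 := by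
    rw [List.nodup_append] at hnd
    intro a ha hb
    exact absurd rfl (hnd.2.2 a ha a hb)
  obtain ⟨i, hi, hip⟩ := List.getElem_of_mem h2
  have hiS : i < S1.length := by omega
  have hpair : (S1[i]'hiS, p) ∈ S1.zip T1 := by
    have hilen : i < (S1.zip T1).length := by rw [List.length_zip]; omega
    have hm := List.getElem_mem hilen
    rw [List.getElem_zip] at hm
    rwa [hip] at hm
  cases hf : (S1.zip T1).find? (fun z => z.1 == p || z.2 == p) with
  | none =>
    exfalso
    have := List.find?_eq_none.mp hf _ hpair
    simp at this
  | some z =>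
    have hzmem := List.mem_of_find?_eq_some hf
    have hzpred := List.find?_some hf
    obtain ⟨hz1, hz2⟩ := List.of_mem_zip hzmem
    simp only [Bool.or_eq_true, beq_iff_eq] at hzpred
    have hz2p : z.2 = p := by
      rcases hzpred with h | h
      · exact absurd h2 (hdisj _ (h ▸ hz1))
      · exact h
    refine ⟨z.1, hz1, ?_⟩
    simp [hz2p]

-- ======== membership facts for sources / targets ========
theorem mem_pvS (P : List (List (String × Option (List (String × Int))))) (i : Int)
    (h : i ∈ pvS P) :
    0 ≤ i ∧ i < (P.length : Int) ∧ i < 30 ∧ i % 10 < 5 ∧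
      (pvDisc (PySem.List.pyGetD P i [])).isSome = true ∧
      pvDisc (PySem.List.pyGetD P (i + 5) []) = none := by
  unfold pvS pvSrcB at h
  rw [List.mem_filter, PySem.List.mem_pyRange_one,
    PySem.Int.mod_eq_emod_of_pos (by norm_num : (0:Int) < 10)] at h
  obtain ⟨⟨h0, h1⟩, hb⟩ := h
  generalize hgen : pvDisc (PySem.List.pyGetD P i []) = o at hb
  cases o with
  | none => simp at hb
  | some d =>
    simp only [Bool.and_eq_true, decide_eq_true_eq, beq_iff_eq, Option.isNone_iff_eq_none] at hb
    exact ⟨h0, by omega, by omega, hb.1, by simp, hb.2.2⟩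

theorem mem_pvJ_iff (P : List (List (String × Option (List (String × Int))))) (j : Int) :
    j ∈ pvJ P ↔ 0 ≤ j ∧ j < (P.length : Int) ∧ j < 30 ∧ 5 ≤ j % 10 ∧
      (pvDisc (PySem.List.pyGetD P j [])).isSome = true ∧
      pvDisc (PySem.List.pyGetD P (j - 5) []) = none := by
  unfold pvJ pvTgtB
  rw [List.mem_filter, PySem.List.mem_pyRange_one,
    PySem.Int.mod_eq_emod_of_pos (by norm_num : (0:Int) < 10)]
  simp only [Bool.and_eq_true, decide_eq_true_eq, Option.isNone_iff_eq_none]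
  constructor
  · rintro ⟨⟨h0, h1⟩, ⟨h2, h3⟩, h4⟩
    exact ⟨h0, by omega, by omega, h2, h3, h4⟩
  · rintro ⟨h0, h1, h2, h3, h4, h5⟩
    exact ⟨⟨h0, by omega⟩, ⟨h3, h4⟩, h5⟩

theorem mem_pvT (P : List (List (String × Option (List (String × Int))))) (t : Int)
    (h : t ∈ pvT P) :
    0 ≤ t ∧ t < (P.length : Int) ∧ t % 10 < 5 ∧ pvDisc (PySem.List.pyGetD P t []) = none := by
  unfold pvT at h
  obtain ⟨j, hj, rfl⟩ := List.mem_map.mp h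
  obtain ⟨h0, h1, h2, h3, _, h5⟩ := (mem_pvJ_iff P j).mp hj
  exact ⟨by omega, by omega, by omega, h5⟩

theorem pvS_sorted (P : List (List (String × Option (List (String × Int))))) :
    (pvS P).Pairwise (· < ·) :=
  List.Pairwise.filter _ (PySem.List.pairwise_lt_pyRange_one 0 _)

theorem pvJ_sorted (P : List (List (String × Option (List (String × Int))))) :
    (pvJ P).Pairwise (· < ·) :=
  List.Pairwise.filter _ (PySem.List.pairwise_lt_pyRange_one 0 _)

theorem pvT_sorted (P : List (List (String × Option (List (String × Int))))) :
    (pvT P).Pairwise (· < ·) :=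
  (pvJ_sorted P).map _ (fun _ _ h => by omega)

theorem pvS_nodup (P : List (List (String × Option (List (String × Int))))) : (pvS P).Nodup :=
  (pvS_sorted P).imp (fun h => ne_of_lt h)

theorem pvT_nodup (P : List (List (String × Option (List (String × Int))))) : (pvT P).Nodup :=
  (pvT_sorted P).imp (fun h => ne_of_lt h)

theorem pvS_T_disjoint (P : List (List (String × Option (List (String × Int))))) :
    ∀ x ∈ pvS P, x ∉ pvT P := by
  intro x hx ht
  have h1 := (mem_pvS P x hx).2.2.2.2.1
  have h2 := (mem_pvT P x ht).2.2.2
  rw [h2] at h1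
  simp at h1

-- ======== zip append helpers ========
theorem pvZip_left (l1 l2 l3 : List Int) (h : l3.length ≤ l1.length) :
    (l1 ++ l2).zip l3 = l1.zip l3 := by
  induction l1 generalizing l3 with
  | nil =>
    cases l3 with
    | nil => simp
    | cons b l3 => simp at h
  | cons a l1 ih =>
    cases l3 with
    | nil => simp
    | cons b l3 => simp [ih l3 (by simpa using h)]

theorem pvZip_right (l1 l3 l4 : List Int) (h : l1.length ≤ l3.length) :
    l1.zip (l3 ++ l4) = l1.zip l3 := by
  induction l1 generalizing l3 with
  | nil => simp
  | cons a l1 ih =>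
    cases l3 with
    | nil => simp at h
    | cons b l3 => simp [ih l3 (by simpa using h)]

-- ======== the break flag freezes the fold ========
theorem pvStep2_done (l : List Int) (st : List (List (String × Option (List (String × Int)))) × List Int × Bool)
    (h : st.2.2 = true) : l.foldl pvStep2 st = st := by
  induction l with
  | nil => rfl
  | cons j l ih =>
    have hs : pvStep2 st j = st := by unfold pvStep2; rw [h]; simp
    rw [List.foldl_cons, hs, ih]

-- ======== first pass of A computes exactly B's source list ========
def pvPA (P : List (List (String × Option (List (String × Int)))))
    (sc : Int × List (String × Option (List (String × Int)))) : Bool :=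
  match pvDisc sc.2 with
  | some d =>
    decide (pvCarga d = 30) &&
    (decide (sc.1 < 5) || decide (10 ≤ sc.1 ∧ sc.1 < 15) || decide (20 ≤ sc.1 ∧ sc.1 < 25)) &&
    (pvDisc (PySem.List.pyGetD P (sc.1 + 5) [])).isNone
  | none => false

theorem pvPass1Step_eq (P : List (List (String × Option (List (String × Int)))))
    (acc : List Int) (sc : Int × List (String × Option (List (String × Int)))) :
    pvPass1Step P acc sc = if pvPA P sc then acc ++ [sc.1] else acc := by
  unfold pvPass1Step pvPA
  generalize pvDisc sc.2 = o
  cases o with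
  | none => rfl
  | some d =>
    by_cases hc : pvCarga d = 30 <;>
      by_cases h1 : sc.1 < 5 <;>
      by_cases h2 : 10 ≤ sc.1 ∧ sc.1 < 15 <;>
      by_cases h3 : 20 ≤ sc.1 ∧ sc.1 < 25 <;>
      by_cases hn : pvDisc (PySem.List.pyGetD P (sc.1 + 5) []) = none <;>
      simp [hc, h1, h2, h3, hn, Option.isNone_iff_eq_none]

theorem pvPass1_eq (P : List (List (String × Option (List (String × Int))))) :
    (PySem.List.enumerate P).foldl (pvPass1Step P) [] = pvS P := by
  have hstep : pvPass1Step P = fun acc sc => if pvPA P sc then acc ++ [Prod.fst sc] else acc := by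
    funext acc sc; exact pvPass1Step_eq P acc sc
  rw [hstep, PySem.List.foldl_append_if, List.nil_append,
    PySem.List.enumerate_eq_map_pyRange P ([]), List.filter_map, List.map_map]
  have hmap : (Prod.fst ∘ fun j => (j, PySem.List.pyGetD P j [])) = id := rfl
  rw [hmap, List.map_id]
  simp only [Function.comp_def]
  have hlen : PySem.List.len P = (P.length : Int) := PySem.List.len_eq P
  rw [hlen]
  have hsplit := PySem.List.pyRange_one_append 0 (min (P.length : Int) 30) (P.length : Int)
    (by omega) (by omega)
  rw [hsplit, List.filter_append]
  have h2 : (PySem.List.pyRange (min (P.length : Int) 30) (P.length : Int) 1).filter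
      (fun j => pvPA P (j, PySem.List.pyGetD P j [])) = [] := by
    apply List.filter_eq_nil_iff.mpr
    intro j hj
    rw [PySem.List.mem_pyRange_one] at hj
    have h30 : 30 ≤ j := by omega
    unfold pvPA
    cases hgen : pvDisc (PySem.List.pyGetD P j []) with
    | none => simp
    | some d =>
      simp only [Bool.and_eq_true, Bool.or_eq_true, decide_eq_true_eq]
      rintro ⟨⟨_, (h | h) | h⟩, _⟩ <;> omega
  rw [h2, List.append_nil]
  unfold pvS
  apply List.filter_congr
  intro j hj
  rw [PySem.List.mem_pyRange_one] at hj
  unfold pvPA pvSrcB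
  rw [PySem.Int.mod_eq_emod_of_pos (by norm_num : (0:Int) < 10)]
  cases hgen : pvDisc (PySem.List.pyGetD P j []) with
  | none => simp
  | some d =>
    rw [Bool.eq_iff_iff]
    simp only [Bool.and_eq_true, Bool.or_eq_true, decide_eq_true_eq, beq_iff_eq]
    constructor
    · rintro ⟨⟨hc, hb⟩, hn⟩
      exact ⟨by omega, hc, hn⟩
    · rintro ⟨hm, hc, hn⟩
      exact ⟨⟨hc, by omega⟩, hn⟩

theorem pvZip_app_one (l1 l2 : List Int) (a b : Int) (h : l1.length = l2.length) :
    (l1 ++ [a]).zip (l2 ++ [b]) = l1.zip l2 ++ [(a, b)] := by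
  induction l1 generalizing l2 with
  | nil => cases l2 with
    | nil => simp
    | cons c l2 => simp at h
  | cons c l1 ih =>
    cases l2 with
    | nil => simp at h
    | cons d l2 => simp [ih l2 (by simpa using h)]

theorem pvLoop (P : List (List (String × Option (List (String × Int))))) :
    ∀ (m : Nat) (j : Int) (S1 S2 J1 J2 : List Int),
      0 ≤ j → j + (m : Int) = (P.length : Int) →
      pvS P = S1 ++ S2 → pvJ P = J1 ++ J2 →
      S2 ≠ [] → S1.length = J1.length →
      (∀ x ∈ J1, x < j) → (∀ x ∈ J2, j ≤ x) →
      ((PySem.List.pyRange j (P.length : Int) 1).foldl pvStep2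
          (pvApply P (S1.zip (J1.map (fun x => x - 5))), S2, false)).1
        = pvApply P ((pvS P).zip (pvT P)) := by
  intro m
  induction m with
  | zero =>
    intro j S1 S2 J1 J2 hj0 hjm hS hJ hS2 hlen hJ1 hJ2
    rw [PySem.List.pyRange_one_eq_nil (by push_cast at hjm; omega)]
    have hJ2nil : J2 = [] := by
      cases J2 with
      | nil => rfl
      | cons a J2' =>
        exfalso
        have haJ : a ∈ pvJ P := by
          rw [hJ]; exact List.mem_append_right _ (List.mem_cons_self ..)
        have h1 := (mem_pvJ_iff P a).mp haJ
        have h2 := hJ2 a (List.mem_cons_self ..)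
        push_cast at hjm
        omega
    rw [hJ2nil, List.append_nil] at hJ
    simp only [List.foldl_nil]
    have hT : pvT P = J1.map (fun x => x - 5) := by unfold pvT; rw [hJ]
    rw [hS, hT, pvZip_left S1 S2 _ (by simp [hlen])]
  | succ m ih =>
    intro j S1 S2 J1 J2 hj0 hjm hS hJ hS2 hlen hJ1 hJ2
    push_cast at hjm
    have hjn : j < (P.length : Int) := by omega
    obtain ⟨s, S2', rfl⟩ : ∃ s S2', S2 = s :: S2' := by
      cases S2 with
      | nil => exact absurd rfl hS2
      | cons s S2' => exact ⟨s, S2', rfl⟩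
    rw [PySem.List.pyRange_one_cons hjn, List.foldl_cons]
    set T1 := J1.map (fun x => x - 5) with hT1def
    set per := pvApply P (S1.zip T1) with hper
    have hS1sub : ∀ x ∈ S1, x ∈ pvS P := fun x hx => hS ▸ List.mem_append_left _ hx
    have hT1sub : ∀ x ∈ T1, x ∈ pvT P := by
      intro x hx
      obtain ⟨y, hy, rfl⟩ := List.mem_map.mp hx
      unfold pvT
      exact List.mem_map_of_mem (by rw [hJ]; exact List.mem_append_left _ hy)
    have hlenT : S1.length = T1.length := by simp [hT1def, hlen]
    have hbS1 : ∀ x ∈ S1, 0 ≤ x ∧ x < (P.length : Int) := fun x hx =>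
      ⟨(mem_pvS P x (hS1sub x hx)).1, (mem_pvS P x (hS1sub x hx)).2.1⟩
    have hbT1 : ∀ x ∈ T1, 0 ≤ x ∧ x < (P.length : Int) := fun x hx =>
      ⟨(mem_pvT P x (hT1sub x hx)).1, (mem_pvT P x (hT1sub x hx)).2.1⟩
    have hndS : S1.Nodup := by
      have h := pvS_nodup P; rw [hS] at h; exact (List.nodup_append.mp h).1
    have hndT : T1.Nodup := by
      have h := pvT_nodup P; unfold pvT at h; rw [hJ, List.map_append] at h
      exact (List.nodup_append.mp h).1
    have hnd1 : (S1 ++ T1).Nodup := by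
      rw [List.nodup_append]
      exact ⟨hndS, hndT, fun a ha b hb he =>
        pvS_T_disjoint P a (hS1sub a ha) (he ▸ hT1sub b hb)⟩
    by_cases hband : (5 ≤ j ∧ j < 10) ∨ (15 ≤ j ∧ j < 20) ∨ (25 ≤ j ∧ j < 30)
    case neg =>
      rw [not_or, not_or] at hband
      have hstep : pvStep2 (per, s :: S2', false) j = (per, s :: S2', false) := by
        unfold pvStep2
        simp only []
        rw [if_neg (by simp)]
        cases hdd : pvDisc (PySem.List.pyGetD per j []) with
        | none => simp
        | some d => rw [if_neg hband.1, if_neg hband.2.1, if_neg hband.2.2]; simp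
      rw [hstep]
      have hjnotJ : j ∉ pvJ P := by
        intro hjJ
        have hf := (mem_pvJ_iff P j).mp hjJ
        rcases hband with ⟨h1, h2, h3⟩
        omega
      have hJ2' : ∀ x ∈ J2, j + 1 ≤ x := by
        intro x hx
        have h1 := hJ2 x hx
        have h2 : x ≠ j := fun he => hjnotJ (he ▸ (hJ ▸ List.mem_append_right _ hx))
        omega
      exact ih (j + 1) S1 (s :: S2') J1 J2 (by omega) (by omega) hS hJ
        (by simp) hlen (fun x hx => by have := hJ1 x hx; omega) hJ2'
    case pos =>
      have hjnotS1 : j ∉ S1 := fun hx => by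
        have := (mem_pvS P j (hS1sub j hx)).2.2.2.1; omega
      have hjnotT1 : j ∉ T1 := fun hx => by
        have := (mem_pvT P j (hT1sub j hx)).2.2.1; omega
      have hperj : PySem.List.pyGetD per j [] = PySem.List.pyGetD P j [] :=
        pvApply_getD_not_mem P S1 T1 hlenT hbS1 hbT1 hnd1 j hj0 hjnotS1 hjnotT1
      cases hdj : pvDisc (PySem.List.pyGetD P j []) with
      | none =>
        have hstep : pvStep2 (per, s :: S2', false) j = (per, s :: S2', false) := by
          unfold pvStep2
          simp only []
          rw [if_neg (by simp)]
          rw [hperj, hdj]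
          simp
        rw [hstep]
        have hjnotJ : j ∉ pvJ P := by
          intro hjJ
          have hf := ((mem_pvJ_iff P j).mp hjJ).2.2.2.2.1
          rw [hdj] at hf
          simp at hf
        have hJ2' : ∀ x ∈ J2, j + 1 ≤ x := by
          intro x hx
          have h1 := hJ2 x hx
          have h2 : x ≠ j := fun he => hjnotJ (he ▸ (hJ ▸ List.mem_append_right _ hx))
          omega
        exact ih (j + 1) S1 (s :: S2') J1 J2 (by omega) (by omega) hS hJ
          (by simp) hlen (fun x hx => by have := hJ1 x hx; omega) hJ2'
      | some d =>
        have harm : pvStep2 (per, s :: S2', false) j =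
            ((pvArm per (s :: S2') j).1, (pvArm per (s :: S2') j).2,
              decide ((pvArm per (s :: S2') j).2 = [])) := by
          unfold pvStep2
          simp only []
          rw [if_neg (by simp)]
          rw [hperj, hdj]
          rcases hband with h | h | h
          · rw [if_pos h]
          · rw [if_neg (by omega), if_pos h]
          · rw [if_neg (by omega), if_neg (by omega), if_pos h]
        rw [harm]
        by_cases ht0 : pvDisc (PySem.List.pyGetD P (j - 5) []) = none
        case pos =>
          have hj5T1 : j - 5 ∉ T1 := by
            intro hx
            obtain ⟨y, hy, he⟩ := List.mem_map.mp hx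
            have hylt := hJ1 y hy
            omega
          have hj5S1 : j - 5 ∉ S1 := by
            intro hx
            have hm := (mem_pvS P (j - 5) (hS1sub _ hx)).2.2.2.2.2
            rw [show j - 5 + 5 = j by ring, hdj] at hm
            simp at hm
          have hpert0 : PySem.List.pyGetD per (j - 5) [] = PySem.List.pyGetD P (j - 5) [] :=
            pvApply_getD_not_mem P S1 T1 hlenT hbS1 hbT1 hnd1 (j - 5) (by omega) hj5S1 hj5T1
          have harm2 : pvArm per (s :: S2') j = (pvSwap per s (j - 5), S2') := by
            unfold pvArm
            rw [if_pos (show pvDisc (PySem.List.pyGetD per (j - 5) []) = none by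
              rw [hpert0]; exact ht0)]
            rfl
          rw [harm2]
          have hjJ : j ∈ pvJ P := (mem_pvJ_iff P j).mpr
            ⟨by omega, hjn, by omega, by omega, by rw [hdj]; rfl, ht0⟩
          obtain ⟨J2', rfl⟩ : ∃ J2', J2 = j :: J2' := by
            have hjJ2 : j ∈ J2 := by
              have hm : j ∈ J1 ++ J2 := hJ ▸ hjJ
              rcases List.mem_append.mp hm with h | h
              · exfalso; have := hJ1 j h; omega
              · exact h
            cases J2 with
            | nil => simp at hjJ2
            | cons a J2' =>
              have hs' := pvJ_sorted P
              rw [hJ] at hs'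
              have hpw := (List.pairwise_append.mp hs').2.1
              rcases List.mem_cons.mp hjJ2 with h | h
              · exact ⟨J2', by rw [h]⟩
              · exfalso
                have h1 := (List.pairwise_cons.mp hpw).1 j h
                have h2 := hJ2 a (List.mem_cons_self ..)
                omega
          have hzip1 : (S1 ++ [s]).zip (T1 ++ [j - 5]) = S1.zip T1 ++ [(s, j - 5)] :=
            pvZip_app_one S1 T1 s (j - 5) hlenT
          have hswap : pvSwap per s (j - 5) = pvApply P ((S1 ++ [s]).zip (T1 ++ [j - 5])) := by
            rw [hzip1, pvApply_append]
          by_cases hS2' : S2' = []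
          case pos =>
            subst hS2'
            rw [pvStep2_done _ _ (by simp)]
            simp only []
            rw [hswap]
            have hSfin : pvS P = S1 ++ [s] := hS
            have hTfin : pvT P = (T1 ++ [j - 5]) ++ J2'.map (fun x => x - 5) := by
              unfold pvT
              rw [hJ]
              simp [hT1def]
            rw [hSfin, hTfin, pvZip_right (S1 ++ [s]) (T1 ++ [j - 5]) (J2'.map (fun x => x - 5))
              (by simp only [List.length_append, List.length_cons,
                    List.length_nil]; omega)]
          case neg =>
            rw [hswap, decide_eq_false hS2']
            have happ : T1 ++ [j - 5] = (J1 ++ [j]).map (fun x => x - 5) := by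
              simp [hT1def]
            rw [happ]
            refine ih (j + 1) (S1 ++ [s]) S2' (J1 ++ [j]) J2' (by omega) (by omega)
              (by rw [hS]; simp) (by rw [hJ]; simp) hS2' (by simp [hlen]) ?_ ?_
            · intro x hx
              rcases List.mem_append.mp hx with h | h
              · have := hJ1 x h; omega
              · simp at h; omega
            · intro x hx
              have hs' := pvJ_sorted P
              rw [hJ] at hs'
              have hpw := (List.pairwise_append.mp hs').2.1
              have := (List.pairwise_cons.mp hpw).1 x hx
              omega
        case neg =>
          have hno : ¬ pvDisc (PySem.List.pyGetD per (j - 5) []) = none := by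
            by_cases h5T : j - 5 ∈ T1
            · obtain ⟨s', hs', he⟩ :=
                pvApply_getD_mem_snd P S1 T1 hlenT hbS1 hbT1 hnd1 (j - 5) (by omega) h5T
              rw [he]
              have hss := (mem_pvS P s' (hS1sub s' hs')).2.2.2.2.1
              intro hcon
              rw [hcon] at hss
              simp at hss
            · have h5S : j - 5 ∉ S1 := by
                intro hx
                have hm := (mem_pvS P (j - 5) (hS1sub _ hx)).2.2.2.2.2
                rw [show j - 5 + 5 = j by ring, hdj] at hm
                simp at hm
              rw [pvApply_getD_not_mem P S1 T1 hlenT hbS1 hbT1 hnd1 (j - 5) (by omega) h5S h5T]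
              exact ht0
          have harm2 : pvArm per (s :: S2') j = (per, s :: S2') := by
            unfold pvArm
            rw [if_neg hno]
          rw [harm2]
          have hjnotJ : j ∉ pvJ P := by
            intro hjJ
            exact ht0 ((mem_pvJ_iff P j).mp hjJ).2.2.2.2.2
          have hJ2' : ∀ x ∈ J2, j + 1 ≤ x := by
            intro x hx
            have h1 := hJ2 x hx
            have h2 : x ≠ j := fun he => hjnotJ (he ▸ (hJ ▸ List.mem_append_right _ hx))
            omega
          have hred : (decide ((s :: S2' : List Int) = [])) = false := by simp
          rw [hred]
          exact ih (j + 1) S1 (s :: S2') J1 J2 (by omega) (by omega) hS hJ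
            (by simp) hlen (fun x hx => by have := hJ1 x hx; omega) hJ2'

theorem windowRepairPeriod_eq_alt (P : List (List (String × Option (List (String × Int))))) :
    windowRepairPeriod P = windowRepairPeriod_alt P := by
  rw [pvAlt_eq]
  unfold windowRepairPeriod
  simp only [pvPass1_eq]
  by_cases hS : pvS P = []
  · simp [hS, pvApply]
  · rw [if_neg hS]
    have h := pvLoop P P.length 0 [] (pvS P) [] (pvJ P) le_rfl (by simp) (by simp) (by simp)
      hS rfl (by simp) (fun x hx => ((mem_pvJ_iff P x).mp hx).1)
    simpa [pvApply] using h

-- ===== VERDICT (by name: the statement is the Claim_ definition above) =====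
theorem windowRepairPeriod_spec : Claim_equal_windowRepairPeriod := by
  intro period _ _
  unfold Spec_windowRepairPeriod
  exact windowRepairPeriod_eq_alt period
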